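-- pv_equiv track=rewrite | github.com/k-acdm/mykt-eitango | scripts/generate_kiso_questions/rank_20_integer_mixed.py | _resolve_band_d_subkind
-- ===== SOURCE A (Python) =====
-- from typing import Any, Dict, List, Optional, Tuple
--
-- def _resolve_band_d_subkind(slot_index: int, subcounts: Dict[str, int]) -> str:
--     """Band D: slot_index → "add_outer" / "mul_outer" / "div_outer"。"""
--     cumulative = 0
--     for subkind in ("add_outer", "mul_outer", "div_outer"):
--         c = subcounts.get(subkind, 0)
--         if c == 0:
--             continue
--         if slot_index < cumulative + c:
--             return subkind
--         cumulative += c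
--     return "div_outer"
-- ===== SOURCE B (Python) =====
-- def _resolve_band_d_subkind(slot_index: int, subcounts: dict) -> str:
--     """Band D: slot_index -> "add_outer" / "mul_outer" / "div_outer"."""
--     expanded = []
--     for subkind in ("add_outer", "mul_outer", "div_outer"):
--         expanded += [subkind] * subcounts.get(subkind, 0)
--     idx = max(slot_index, 0)
--     return expanded[idx] if idx < len(expanded) else "div_outer"
-- ===== Notes on version B (the rewrite author's own statement) =====
-- stated objective: alternative
-- what changed: Replaces the running-cumulative interval scan by materializing the expanded per-slot list (each subkind repeated its count times) and doing one direct clamped index lookup with a div_outer fallback.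
-- outside the precondition, e.g. on _resolve_band_d_subkind(-5, {'add_outer': -1}): A returns 'add_outer', B returns 'div_outer'
import Mathlib
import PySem

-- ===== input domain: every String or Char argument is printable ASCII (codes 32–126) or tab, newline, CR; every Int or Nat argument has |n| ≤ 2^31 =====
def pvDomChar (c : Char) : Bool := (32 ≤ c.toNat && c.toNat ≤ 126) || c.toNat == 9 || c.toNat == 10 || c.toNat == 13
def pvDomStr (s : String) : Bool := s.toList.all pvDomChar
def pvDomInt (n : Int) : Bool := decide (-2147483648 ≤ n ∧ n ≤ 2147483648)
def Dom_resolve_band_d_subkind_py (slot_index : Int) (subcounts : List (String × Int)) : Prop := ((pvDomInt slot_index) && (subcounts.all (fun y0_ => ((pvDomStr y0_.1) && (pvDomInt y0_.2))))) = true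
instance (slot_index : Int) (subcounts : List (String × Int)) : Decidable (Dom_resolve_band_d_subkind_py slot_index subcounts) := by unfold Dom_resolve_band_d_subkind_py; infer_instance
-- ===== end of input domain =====

-- B materializes the expanded per-slot list (each subkind repeated its count times)
-- and answers by one clamped direct index lookup with a "div_outer" fallback,
-- instead of A's running-cumulative interval scan; objective: alternative.

-- ===== PORT A =====
-- the 'for subkind in (...)' loop with early returns and the running 'cumulative'
def pvLoopA (slot_index : Int) (subcounts : List (String × Int)) :
    List String → Int → String
  | [], _ => "div_outer"
  | k :: rest, cum =>
    let c := (PySem.Dict.mk subcounts).getD k 0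
    if c = 0 then pvLoopA slot_index subcounts rest cum
    else if slot_index < cum + c then k
    else pvLoopA slot_index subcounts rest (cum + c)

def resolve_band_d_subkind_py (slot_index : Int) (subcounts : List (String × Int)) : String :=
  pvLoopA slot_index subcounts ["add_outer", "mul_outer", "div_outer"] 0

-- ===== PORT B =====
def resolve_band_d_subkind_py_alt (slot_index : Int) (subcounts : List (String × Int)) : String :=
  let expanded := (["add_outer", "mul_outer", "div_outer"]).foldl
    (fun acc k => acc ++ PySem.List.pyRepeat [k] ((PySem.Dict.mk subcounts).getD k 0))
    ([] : List String)
  let idx := max slot_index 0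
  if idx < (expanded.length : Int) then (PySem.List.pyGet? expanded idx).getD "div_outer"
  else "div_outer"

-- ===== PRECONDITION & SPEC =====
-- Pre_ excludes NEGATIVE "add_outer"/"mul_outer" counts: slot counts are nonnegative
-- by the function's purpose, and A's values on negative counts are accidental interval
-- arithmetic (see claim.json cites); the "div_outer" count never affects A's answer.
def Pre_resolve_band_d_subkind_py (slot_index : Int) (subcounts : List (String × Int)) : Prop :=
  0 ≤ (PySem.Dict.mk subcounts).getD "add_outer" 0 ∧
  0 ≤ (PySem.Dict.mk subcounts).getD "mul_outer" 0
instance (slot_index : Int) (subcounts : List (String × Int)) : Decidable (Pre_resolve_band_d_subkind_py slot_index subcounts) := by unfold Pre_resolve_band_d_subkind_py; infer_instance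

def pvWitness_resolve_band_d_subkind_py : Int × (List (String × Int)) := (1, [("add_outer", 2), ("mul_outer", 1)])

def Spec_resolve_band_d_subkind_py (slot_index : Int) (subcounts : List (String × Int)) (out : String) : Prop := out = resolve_band_d_subkind_py_alt slot_index subcounts
instance (slot_index : Int) (subcounts : List (String × Int)) (out : String) : Decidable (Spec_resolve_band_d_subkind_py slot_index subcounts out) := by unfold Spec_resolve_band_d_subkind_py; infer_instance

-- ===== CLAIM (what is proved, stated in full; the proofs are below) =====
def Claim_equal_resolve_band_d_subkind_py : Prop := ∀ (slot_index : Int) (subcounts : List (String × Int)), Dom_resolve_band_d_subkind_py slot_index subcounts → Pre_resolve_band_d_subkind_py slot_index subcounts → Spec_resolve_band_d_subkind_py slot_index subcounts (resolve_band_d_subkind_py slot_index subcounts)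

-- ===== LEMMAS AND PROOFS =====

-- indexing into three concatenated replicate blocks
theorem pvGetRep3 (na nm nd i : ℕ) (sa sm sd : String) :
    (List.replicate na sa ++ (List.replicate nm sm ++ List.replicate nd sd))[i]? =
      if i < na + (nm + nd) then
        some (if i < na then sa else if i < na + nm then sm else sd)
      else none := by
  rcases Nat.lt_or_ge i na with h1 | h1
  · rw [List.getElem?_append_left (by simpa using h1), List.getElem?_replicate,
      if_pos h1, if_pos (by omega), if_pos h1]
  · rw [List.getElem?_append_right (by simpa using h1), List.length_replicate]
    rcases Nat.lt_or_ge i (na + nm) with h2 | h2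
    · rw [List.getElem?_append_left (by simp; omega), List.getElem?_replicate,
        if_pos (show i - na < nm by omega), if_pos (by omega),
        if_neg (Nat.not_lt.mpr h1), if_pos h2]
    · rw [List.getElem?_append_right (by simp; omega), List.length_replicate,
        List.getElem?_replicate]
      by_cases h3 : i - na - nm < nd
      · rw [if_pos h3, if_pos (by omega), if_neg (Nat.not_lt.mpr h1),
          if_neg (Nat.not_lt.mpr h2)]
      · rw [if_neg h3, if_neg (by omega)]

-- ===== VERDICT (by name: the statement is the Claim_ definition above) =====
theorem resolve_band_d_subkind_py_spec : Claim_equal_resolve_band_d_subkind_py := by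
  intro slot_index subcounts _ hpre
  obtain ⟨ha, hm⟩ := hpre
  show _ = _
  set a := (PySem.Dict.mk subcounts).getD "add_outer" 0 with hadef
  set m := (PySem.Dict.mk subcounts).getD "mul_outer" 0 with hmdef
  set d := (PySem.Dict.mk subcounts).getD "div_outer" 0 with hddef
  have hi : (0 : Int) ≤ max slot_index 0 := le_max_right _ _
  have hs : max slot_index 0 = slot_index ∨ (slot_index ≤ 0 ∧ max slot_index 0 = 0) := by
    rcases le_total slot_index 0 with h | h
    · exact Or.inr ⟨h, max_eq_right h⟩
    · exact Or.inl (max_eq_left h)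
  simp only [resolve_band_d_subkind_py, pvLoopA, resolve_band_d_subkind_py_alt,
    List.foldl, List.nil_append, PySem.List.pyRepeat_singleton, List.append_assoc,
    ← hadef, ← hmdef, ← hddef]
  rw [PySem.List.pyGet?_of_nonneg _ hi, pvGetRep3]
  simp only [List.length_append, List.length_replicate]
  generalize hj : (max slot_index 0).toNat = j at *
  have hj1 : (j : Int) = max slot_index 0 := by omega
  split_ifs <;> first | rfl | (exfalso; omega)
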